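-- pv_equiv track=rewrite | github.com/Haruka1129gif/koara | ai.py | count_stable_stones
-- ===== SOURCE A (Python) =====
-- def count_stable_stones(board, stone):
--     stable = 0
--     directions = [(-1, 0), (1, 0), (0, -1), (0, 1)]
--     for y in range(len(board)):
--         for x in range(len(board[0])):
--             if board[y][x] == stone and is_stable(board, stone, x, y, directions):
--                 stable += 1
--     return stable
--
-- def is_stable(board, stone, x, y, directions):
--     for dx, dy in directions:
--         nx, ny = x, y
--         while 0 <= nx < len(board[0]) and 0 <= ny < len(board):
--             if board[ny][nx] != stone:
--                 return False
--             nx += dx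
--             ny += dy
--     return True
-- ===== SOURCE B (Python) =====
-- def count_stable_stones(board, stone):
--     # A stone is stable iff its entire row and entire column are the player's
--     # stones, so the count factorises: (#full rows) * (#full columns).
--     if not board:
--         return 0
--     w = len(board[0])
--     full_rows = sum(1 for row in board if all(row[x] == stone for x in range(w)))
--     full_cols = sum(1 for x in range(w) if all(row[x] == stone for row in board))
--     return full_rows * full_cols
-- ===== Notes on version B (the rewrite author's own statement) =====
-- stated objective: faster
-- what changed: Instead of testing stability per cell by walking to all four borders, B computes the number of full-of-stone rows and full-of-stone columns in one pass each and returns their product.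
import Mathlib
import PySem

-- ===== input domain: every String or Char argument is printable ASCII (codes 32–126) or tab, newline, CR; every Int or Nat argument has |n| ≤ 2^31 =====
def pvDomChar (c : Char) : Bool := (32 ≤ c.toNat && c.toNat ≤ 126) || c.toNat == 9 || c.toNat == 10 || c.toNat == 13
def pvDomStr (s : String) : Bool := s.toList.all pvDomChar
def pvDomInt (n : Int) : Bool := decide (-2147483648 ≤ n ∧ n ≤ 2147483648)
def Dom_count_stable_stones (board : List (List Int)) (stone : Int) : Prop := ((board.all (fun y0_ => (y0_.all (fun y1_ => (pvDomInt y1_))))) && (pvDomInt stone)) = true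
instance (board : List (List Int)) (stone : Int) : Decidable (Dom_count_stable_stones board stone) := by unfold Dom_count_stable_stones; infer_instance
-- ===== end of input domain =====

-- B replaces A's per-cell four-direction border walks by counting full-of-stone rows
-- and full-of-stone columns once and returning their product (measured faster).

-- ===== PORT A =====
-- the while-loop of is_stable; fuel w+h+1 always suffices inside Pre_ (each unit step
-- moves one closer to a border), so the walk checks exactly the cells Python checks
def pvWalk (board : List (List Int)) (stone w h dx dy : Int) : Nat → Int → Int → Bool
  | 0, _, _ => true
  | fuel+1, nx, ny =>
    if 0 ≤ nx ∧ nx < w ∧ 0 ≤ ny ∧ ny < h then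
      if PySem.List.pyGetD (PySem.List.pyGetD board ny []) nx 0 ≠ stone then false
      else pvWalk board stone w h dx dy fuel (nx + dx) (ny + dy)
    else true

def is_stable (board : List (List Int)) (stone x y : Int) (directions : List (Int × Int)) : Bool :=
  directions.all fun d =>
    pvWalk board stone ((board.headD []).length : Int) (board.length : Int) d.1 d.2
      ((board.headD []).length + board.length + 1) x y

def count_stable_stones (board : List (List Int)) (stone : Int) : Int :=
  (PySem.List.pyRange 0 (board.length : Int)).foldl (fun stable y =>
    (PySem.List.pyRange 0 ((board.headD []).length : Int)).foldl (fun stable x =>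
      if PySem.List.pyGetD (PySem.List.pyGetD board y []) x 0 == stone
          && is_stable board stone x y [(-1,0),(1,0),(0,-1),(0,1)]
        then stable + 1 else stable) stable) 0

-- ===== PORT B =====
def count_stable_stones_alt (board : List (List Int)) (stone : Int) : Int :=
  if board = [] then 0
  else
    let w := (board.headD []).length
    let fullRows : Int :=
      (board.countP (fun row =>
        (PySem.List.pyRange 0 (w : Int)).all (fun x => PySem.List.pyGetD row x 0 == stone)) : Nat)
    let fullCols : Int :=
      ((PySem.List.pyRange 0 (w : Int)).countP (fun x =>
        board.all (fun row => PySem.List.pyGetD row x 0 == stone)) : Nat)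
    fullRows * fullCols

-- ===== PRECONDITION & SPEC =====
-- Pre_ excludes exactly the boards on which the Python A raises IndexError:
-- boards with some row shorter than row 0 (A reads board[y][x] for every x < len(board[0])).
def Pre_count_stable_stones (board : List (List Int)) (stone : Int) : Prop :=
  ∀ row ∈ board, (board.headD []).length ≤ row.length
instance (board : List (List Int)) (stone : Int) : Decidable (Pre_count_stable_stones board stone) := by
  unfold Pre_count_stable_stones; infer_instance

def pvWitness_count_stable_stones : List (List Int) × Int := ([[1, 0], [1, 1]], 1)

def Spec_count_stable_stones (board : List (List Int)) (stone : Int) (out : Int) : Prop := out = count_stable_stones_alt board stone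
instance (board : List (List Int)) (stone : Int) (out : Int) : Decidable (Spec_count_stable_stones board stone out) := by unfold Spec_count_stable_stones; infer_instance

-- ===== CLAIM (what is proved, stated in full; the proofs are below) =====
def Claim_equal_count_stable_stones : Prop := ∀ (board : List (List Int)) (stone : Int), Dom_count_stable_stones board stone → Pre_count_stable_stones board stone → Spec_count_stable_stones board stone (count_stable_stones board stone)

-- ===== LEMMAS AND PROOFS =====

-- the cell at Nat coordinates (y, x), out-of-range reads defaulting like the ports'
def pvCell (board : List (List Int)) (y x : Nat) : Int := (board.getD y []).getD x 0

lemma pvWalk_out (board : List (List Int)) (stone w h dx dy : Int) (f : Nat) (nx ny : Int)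
    (hout : ¬ (0 ≤ nx ∧ nx < w ∧ 0 ≤ ny ∧ ny < h)) :
    pvWalk board stone w h dx dy f nx ny = true := by
  cases f with
  | zero => rfl
  | succ f => simp only [pvWalk, if_neg hout]

lemma pvWalk_left (board : List (List Int)) (stone : Int) (w h y : Nat) (hy : y < h) :
    ∀ (x f : Nat), x < w → x < f →
      (pvWalk board stone (w : Int) (h : Int) (-1) 0 f (x : Int) (y : Int) = true ↔
        ∀ x' ≤ x, pvCell board y x' = stone) := by
  intro x
  induction x with
  | zero =>
    intro f hxw hf
    obtain ⟨f, rfl⟩ : ∃ f', f = f' + 1 := ⟨f - 1, by omega⟩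
    simp only [pvWalk]
    split_ifs with hcond hcell
    · refine iff_of_false (by simp) ?_
      simp only [PySem.List.pyGetD_natCast] at hcell
      intro hall
      exact hcell (by simpa [pvCell] using hall 0 le_rfl)
    · rw [pvWalk_out board stone (w:Int) (h:Int) (-1) 0 f ((((0:Nat)):Int) + -1) (((y:Nat):Int) + 0) (by rintro ⟨h1, -⟩; omega)]
      simp only [PySem.List.pyGetD_natCast, not_not] at hcell
      refine iff_of_true rfl ?_
      intro x' hx'
      interval_cases x'
      simpa [pvCell] using hcell
    · exact absurd (by push_cast; omega) hcond
  | succ k ih =>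
    intro f hxw hf
    obtain ⟨f, rfl⟩ : ∃ f', f = f' + 1 := ⟨f - 1, by omega⟩
    simp only [pvWalk]
    split_ifs with hcond hcell
    · refine iff_of_false (by simp) ?_
      simp only [PySem.List.pyGetD_natCast] at hcell
      intro hall
      exact hcell (by simpa [pvCell] using hall (k+1) le_rfl)
    · rw [show ((((k+1:Nat)):Int) + -1) = ((k:Nat):Int) by push_cast; ring,
          show ((y:Nat):Int) + 0 = ((y:Nat):Int) by ring]
      rw [ih f (by omega) (by omega)]
      simp only [PySem.List.pyGetD_natCast, not_not] at hcell
      constructor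
      · intro hall x' hx'
        rcases Nat.lt_or_ge x' (k+1) with h' | h'
        · exact hall x' (by omega)
        · have : x' = k + 1 := by omega
          subst this; simpa [pvCell] using hcell
      · intro hall x' hx'
        exact hall x' (by omega)
    · exact absurd (by push_cast; omega) hcond

lemma pvWalk_right (board : List (List Int)) (stone : Int) (w h y : Nat) (hy : y < h) :
    ∀ (f x : Nat), x < w → w - x ≤ f →
      (pvWalk board stone (w : Int) (h : Int) 1 0 f (x : Int) (y : Int) = true ↔
        ∀ x', x ≤ x' → x' < w → pvCell board y x' = stone) := by
  intro f
  induction f with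
  | zero => intro x hxw hf; omega
  | succ f ih =>
    intro x hxw hf
    simp only [pvWalk]
    split_ifs with hcond hcell
    · refine iff_of_false (by simp) ?_
      simp only [PySem.List.pyGetD_natCast] at hcell
      intro hall
      exact hcell (by simpa [pvCell] using hall x le_rfl hxw)
    · simp only [PySem.List.pyGetD_natCast, not_not] at hcell
      rw [show ((x:Nat):Int) + 1 = ((x+1:Nat):Int) by push_cast; ring,
          show ((y:Nat):Int) + 0 = ((y:Nat):Int) by ring]
      rcases Nat.lt_or_ge (x+1) w with hw | hw
      · rw [ih (x+1) hw (by omega)]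
        constructor
        · intro hall x' h1 h2
          rcases Nat.eq_or_lt_of_le h1 with h' | h'
          · subst h'; simpa [pvCell] using hcell
          · exact hall x' (by omega) h2
        · intro hall x' h1 h2
          exact hall x' (by omega) h2
      · rw [pvWalk_out board stone (w:Int) (h:Int) 1 0 f ((x+1:Nat):Int) ((y:Nat):Int)
              (by rintro ⟨-, h2, -⟩; omega)]
        refine iff_of_true rfl ?_
        intro x' h1 h2
        have : x' = x := by omega
        subst this; simpa [pvCell] using hcell
    · exact absurd (by push_cast; omega) hcond

lemma pvWalk_up (board : List (List Int)) (stone : Int) (w h x : Nat) (hx : x < w) :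
    ∀ (y f : Nat), y < h → y < f →
      (pvWalk board stone (w : Int) (h : Int) 0 (-1) f (x : Int) (y : Int) = true ↔
        ∀ y' ≤ y, pvCell board y' x = stone) := by
  intro y
  induction y with
  | zero =>
    intro f hyh hf
    obtain ⟨f, rfl⟩ : ∃ f', f = f' + 1 := ⟨f - 1, by omega⟩
    simp only [pvWalk]
    split_ifs with hcond hcell
    · refine iff_of_false (by simp) ?_
      simp only [PySem.List.pyGetD_natCast] at hcell
      intro hall
      exact hcell (by simpa [pvCell] using hall 0 le_rfl)
    · rw [pvWalk_out board stone (w:Int) (h:Int) 0 (-1) f (((x:Nat):Int) + 0) ((((0:Nat)):Int) + -1)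
            (by rintro ⟨-, -, h3, -⟩; omega)]
      simp only [PySem.List.pyGetD_natCast, not_not] at hcell
      refine iff_of_true rfl ?_
      intro y' hy'
      interval_cases y'
      simpa [pvCell] using hcell
    · exact absurd (by push_cast; omega) hcond
  | succ k ih =>
    intro f hyh hf
    obtain ⟨f, rfl⟩ : ∃ f', f = f' + 1 := ⟨f - 1, by omega⟩
    simp only [pvWalk]
    split_ifs with hcond hcell
    · refine iff_of_false (by simp) ?_
      simp only [PySem.List.pyGetD_natCast] at hcell
      intro hall
      exact hcell (by simpa [pvCell] using hall (k+1) le_rfl)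
    · rw [show ((((k+1:Nat)):Int) + -1) = ((k:Nat):Int) by push_cast; ring,
          show ((x:Nat):Int) + 0 = ((x:Nat):Int) by ring]
      rw [ih f (by omega) (by omega)]
      simp only [PySem.List.pyGetD_natCast, not_not] at hcell
      constructor
      · intro hall y' hy'
        rcases Nat.lt_or_ge y' (k+1) with h' | h'
        · exact hall y' (by omega)
        · have : y' = k + 1 := by omega
          subst this; simpa [pvCell] using hcell
      · intro hall y' hy'
        exact hall y' (by omega)
    · exact absurd (by push_cast; omega) hcond

lemma pvWalk_down (board : List (List Int)) (stone : Int) (w h x : Nat) (hx : x < w) :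
    ∀ (f y : Nat), y < h → h - y ≤ f →
      (pvWalk board stone (w : Int) (h : Int) 0 1 f (x : Int) (y : Int) = true ↔
        ∀ y', y ≤ y' → y' < h → pvCell board y' x = stone) := by
  intro f
  induction f with
  | zero => intro y hyh hf; omega
  | succ f ih =>
    intro y hyh hf
    simp only [pvWalk]
    split_ifs with hcond hcell
    · refine iff_of_false (by simp) ?_
      simp only [PySem.List.pyGetD_natCast] at hcell
      intro hall
      exact hcell (by simpa [pvCell] using hall y le_rfl hyh)
    · simp only [PySem.List.pyGetD_natCast, not_not] at hcell
      rw [show ((y:Nat):Int) + 1 = ((y+1:Nat):Int) by push_cast; ring,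
          show ((x:Nat):Int) + 0 = ((x:Nat):Int) by ring]
      rcases Nat.lt_or_ge (y+1) h with hw | hw
      · rw [ih (y+1) hw (by omega)]
        constructor
        · intro hall y' h1 h2
          rcases Nat.eq_or_lt_of_le h1 with h' | h'
          · subst h'; simpa [pvCell] using hcell
          · exact hall y' (by omega) h2
        · intro hall y' h1 h2
          exact hall y' (by omega) h2
      · rw [pvWalk_out board stone (w:Int) (h:Int) 0 1 f ((x:Nat):Int) ((y+1:Nat):Int)
              (by rintro ⟨-, -, -, h4⟩; omega)]
        refine iff_of_true rfl ?_
        intro y' h1 h2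
        have : y' = y := by omega
        subst this; simpa [pvCell] using hcell
    · exact absurd (by push_cast; omega) hcond

-- a stone at (x, y) is stable iff its whole row and its whole column are the player's
lemma pv_is_stable_iff (board : List (List Int)) (stone : Int) (w h x y : Nat)
    (hw : (board.headD []).length = w) (hh : board.length = h) (hx : x < w) (hy : y < h) :
    (is_stable board stone (x : Int) (y : Int) [(-1,0),(1,0),(0,-1),(0,1)] = true ↔
      ((∀ x' < w, pvCell board y x' = stone) ∧ (∀ y' < h, pvCell board y' x = stone))) := by
  simp only [is_stable, List.all_cons, List.all_nil, Bool.and_true, Bool.and_eq_true, hw, hh]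
  rw [pvWalk_left board stone w h y hy x (w + h + 1) hx (by omega),
      pvWalk_right board stone w h y hy (w + h + 1) x hx (by omega),
      pvWalk_up board stone w h x hx y (w + h + 1) hy (by omega),
      pvWalk_down board stone w h x hx (w + h + 1) y hy (by omega)]
  constructor
  · rintro ⟨l, r, u, d⟩
    refine ⟨fun x' hx' => ?_, fun y' hy' => ?_⟩
    · rcases Nat.lt_or_ge x x' with h' | h'
      · exact r x' (by omega) hx'
      · exact l x' (by omega)
    · rcases Nat.lt_or_ge y y' with h' | h'
      · exact d y' (by omega) hy'
      · exact u y' (by omega)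
  · rintro ⟨rows, cols⟩
    exact ⟨fun x' hx' => rows x' (by omega), fun x' _ hx' => rows x' hx',
           fun y' hy' => cols y' (by omega), fun y' _ hy' => cols y' hy'⟩

-- B's row-full and column-full predicates, named for the proofs
def pvRowFull (board : List (List Int)) (stone : Int) (row : List Int) : Bool :=
  (PySem.List.pyRange 0 ((board.headD []).length : Int)).all (fun x => PySem.List.pyGetD row x 0 == stone)
def pvColFull (board : List (List Int)) (stone : Int) (x : Int) : Bool :=
  board.all (fun row => PySem.List.pyGetD row x 0 == stone)

lemma pvRowFull_iff (board : List (List Int)) (stone : Int) (w : Nat)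
    (hw : (board.headD []).length = w) (row : List Int) :
    (pvRowFull board stone row = true ↔ ∀ k < w, row.getD k 0 = stone) := by
  simp only [pvRowFull, hw, List.all_eq_true]
  constructor
  · intro hall k hk
    have := hall (k : Int) (PySem.List.mem_pyRange_one.mpr ⟨by positivity, by exact_mod_cast hk⟩)
    simpa [PySem.List.pyGetD_natCast] using this
  · intro hall xI hmem
    obtain ⟨h0, hlt⟩ := PySem.List.mem_pyRange_one.mp hmem
    obtain ⟨k, rfl⟩ : ∃ k : Nat, (k : Int) = xI := ⟨xI.toNat, Int.toNat_of_nonneg h0⟩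
    simpa [PySem.List.pyGetD_natCast] using hall k (by exact_mod_cast hlt)

lemma pvColFull_iff (board : List (List Int)) (stone : Int) (h : Nat)
    (hh : board.length = h) (k : Nat) :
    (pvColFull board stone (k : Int) = true ↔ ∀ y' < h, pvCell board y' k = stone) := by
  simp only [pvColFull, List.all_eq_true]
  constructor
  · intro hall y' hy'
    have hmem : board.getD y' [] ∈ board := by
      rw [List.getD_eq_getElem board [] (by omega)]
      exact List.getElem_mem _
    simpa [PySem.List.pyGetD_natCast, pvCell] using hall _ hmem
  · intro hall row hrow
    obtain ⟨i, hi, rfl⟩ := List.mem_iff_getElem.mp hrow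
    have := hall i (by omega)
    simp only [pvCell] at this
    rw [List.getD_eq_getElem board [] hi] at this
    simpa [PySem.List.pyGetD_natCast] using this

lemma pv_sum_ite_const {α : Type} (l : List α) (p : α → Bool) (c : Int) :
    (l.map (fun a => if p a then c else 0)).sum = c * (l.countP p : Int) := by
  induction l with
  | nil => simp
  | cons a t ih =>
    simp only [List.map_cons, List.sum_cons, List.countP_cons, ih]
    by_cases h : p a = true <;> simp [h] <;> push_cast <;> ring

lemma pv_countP_range_getD {α : Type} (l : List α) (p : α → Bool) (d : α) :
    (List.range l.length).countP (fun i => p (l.getD i d)) = l.countP p := by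
  induction l with
  | nil => simp
  | cons a t ih =>
    simp only [List.length_cons, List.range_succ_eq_map, List.countP_cons, List.countP_map]
    simp only [Function.comp_def, List.getD_cons_zero, List.getD_cons_succ]
    rw [ih]

-- A's inner loop over row y counts the full columns if row y is full, else nothing
lemma pv_inner_count (board : List (List Int)) (stone : Int) (w h y : Nat)
    (hw : (board.headD []).length = w) (hh : board.length = h) (hy : y < h) :
    (PySem.List.pyRange 0 (w : Int)).countP (fun xI =>
        PySem.List.pyGetD (PySem.List.pyGetD board (y : Int) []) xI 0 == stone
          && is_stable board stone xI (y : Int) [(-1,0),(1,0),(0,-1),(0,1)])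
      = if pvRowFull board stone (board.getD y []) then
          (PySem.List.pyRange 0 (w : Int)).countP (pvColFull board stone) else 0 := by
  rw [List.countP_congr (q := fun xI => pvRowFull board stone (board.getD y []) && pvColFull board stone xI) ?_]
  · by_cases hR : pvRowFull board stone (board.getD y []) = true
    · simp only [hR]; simp
    · simp only [Bool.not_eq_true] at hR
      simp only [hR]; simp
  · intro xI hmem
    obtain ⟨h0, hlt⟩ := PySem.List.mem_pyRange_one.mp hmem
    obtain ⟨k, rfl⟩ : ∃ k : Nat, (k : Int) = xI := ⟨xI.toNat, Int.toNat_of_nonneg h0⟩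
    have hk : k < w := by exact_mod_cast hlt
    rw [Bool.eq_iff_iff]
    have hstab := pv_is_stable_iff board stone w h k y hw hh hk hy
    have hrow := pvRowFull_iff board stone w hw (board.getD y [])
    have hcol := pvColFull_iff board stone h hh k
    constructor
    · intro hA
      simp only [Bool.and_eq_true, beq_iff_eq] at hA ⊢
      rw [iff_true] at hA
      obtain ⟨hc, hs⟩ := hA
      obtain ⟨rows, cols⟩ := hstab.mp hs
      exact ⟨hrow.mpr (fun k' hk' => rows k' hk'), hcol.mpr cols⟩
    · intro hB
      simp only [Bool.and_eq_true, beq_iff_eq] at hB ⊢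
      try rw [iff_true]
      obtain ⟨hr, hc⟩ := hB
      have rows := hrow.mp hr
      have cols := hcol.mp hc
      refine ⟨by simpa [pvCell] using rows k hk,
        hstab.mpr ⟨fun x' hx' => by simpa [pvCell] using rows x' hx', cols⟩⟩

theorem pv_main (board : List (List Int)) (stone : Int) :
    count_stable_stones board stone = count_stable_stones_alt board stone := by
  by_cases hb : board = []
  · subst hb; rfl
  · unfold count_stable_stones count_stable_stones_alt
    rw [if_neg hb]
    rw [PySem.List.pyRange_zero_natCast board.length, List.foldl_map]
    rw [PySem.List.foldl_congr_mem (List.range board.length) _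
      (fun s (y : Nat) => s + ((if pvRowFull board stone (board.getD y []) then
        (PySem.List.pyRange 0 ((board.headD []).length : Int)).countP (pvColFull board stone)
        else 0 : Nat) : Int)) 0 ?_]
    · rw [PySem.List.foldl_add]
      simp only [Nat.cast_ite, Nat.cast_zero]
      rw [pv_sum_ite_const, pv_countP_range_getD board (pvRowFull board stone) []]
      unfold pvRowFull pvColFull
      ring
    · intro acc y hymem
      have hy : y < board.length := List.mem_range.mp hymem
      rw [PySem.List.foldl_count_if]
      rw [pv_inner_count board stone (board.headD []).length board.length y rfl rfl hy]

-- ===== VERDICT (by name: the statement is the Claim_ definition above) =====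
theorem count_stable_stones_spec : Claim_equal_count_stable_stones := by
  intro board stone _hdom _hpre
  unfold Spec_count_stable_stones
  exact pv_main board stone
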